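-- pv_equiv track=rewrite | github.com/bradhave94/nms-scraper | nutrient_processor_extractor.py | determine_cooking_operation
-- ===== SOURCE A (Python) =====
-- from typing import Dict, List, Optional, Any
--
-- def determine_cooking_operation(inputs: List[Dict], output_name: str) -> str:
--     """Determine the cooking operation type based on inputs and output"""
--     output_lower = output_name.lower()
--
--     # Common cooking operations
--     if any(keyword in output_lower for keyword in ['ferment', 'aged', 'wine', 'alcohol']):
--         return "Processor Setting: Fermentation"
--     elif any(keyword in output_lower for keyword in ['extract', 'oil', 'essence']):
--         return "Processor Setting: Extract Nutrients"
--     elif any(keyword in output_lower for keyword in ['yolk', 'egg']):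
--         return "Processor Setting: Chromatic Yolk Formation"
--     elif any(keyword in output_lower for keyword in ['bake', 'cake', 'bread', 'pie']):
--         return "Processor Setting: Baking"
--     elif any(keyword in output_lower for keyword in ['grill', 'meat', 'steak']):
--         return "Processor Setting: Grilling"
--     elif any(keyword in output_lower for keyword in ['blend', 'mix', 'combine']):
--         return "Processor Setting: Blending"
--     elif any(keyword in output_lower for keyword in ['soup', 'stew', 'broth']):
--         return "Processor Setting: Cooking"
--     elif len(inputs) == 1:
--         return "Processor Setting: Processing"
--     else:
--         return "Processor Setting: Combining"
-- ===== SOURCE B (Python) =====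
-- from typing import Dict, List, Optional, Any
--
-- # B: flat keyword->priority scoring map instead of an ordered if-elif chain of keyword
-- # groups: score every keyword once, take the MINIMUM matched priority (exhaustive
-- # scoring + argmin, no short-circuit rule order). Objective: alternative.
-- _KEYWORD_PRIORITY = {
--     'ferment': 0, 'aged': 0, 'wine': 0, 'alcohol': 0,
--     'extract': 1, 'oil': 1, 'essence': 1,
--     'yolk': 2, 'egg': 2,
--     'bake': 3, 'cake': 3, 'bread': 3, 'pie': 3,
--     'grill': 4, 'meat': 4, 'steak': 4,
--     'blend': 5, 'mix': 5, 'combine': 5,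
--     'soup': 6, 'stew': 6, 'broth': 6,
-- }
-- _SETTINGS = ['Fermentation', 'Extract Nutrients', 'Chromatic Yolk Formation',
--              'Baking', 'Grilling', 'Blending', 'Cooking']
--
-- def determine_cooking_operation(inputs: List[Dict], output_name: str) -> str:
--     low = output_name.lower()
--     matched = [p for kw, p in _KEYWORD_PRIORITY.items() if kw in low]
--     if matched:
--         return "Processor Setting: " + _SETTINGS[min(matched)]
--     return "Processor Setting: Processing" if len(inputs) == 1 else "Processor Setting: Combining"
-- ===== Notes on version B (the rewrite author's own statement) =====
-- stated objective: alternative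
-- what changed: Replaces the ordered seven-branch if-elif chain of keyword groups by a flat keyword-to-priority scoring map: every keyword is tested exhaustively, the minimum matched priority selects the setting (argmin over scores instead of first-match over ordered groups).
import Mathlib
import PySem

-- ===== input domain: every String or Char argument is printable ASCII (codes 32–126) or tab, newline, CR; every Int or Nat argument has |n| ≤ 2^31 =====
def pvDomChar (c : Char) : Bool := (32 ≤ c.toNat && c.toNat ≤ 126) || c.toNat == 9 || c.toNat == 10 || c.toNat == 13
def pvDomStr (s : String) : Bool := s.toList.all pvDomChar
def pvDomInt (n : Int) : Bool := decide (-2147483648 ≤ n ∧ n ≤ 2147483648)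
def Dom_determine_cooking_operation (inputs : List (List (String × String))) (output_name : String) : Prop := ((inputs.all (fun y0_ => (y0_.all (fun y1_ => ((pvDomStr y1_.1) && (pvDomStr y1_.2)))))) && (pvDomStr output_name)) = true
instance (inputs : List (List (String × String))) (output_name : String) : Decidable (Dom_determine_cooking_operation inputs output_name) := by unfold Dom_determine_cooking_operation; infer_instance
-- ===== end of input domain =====

-- B replaces A's ordered if-elif chain by a flat keyword->priority map scored exhaustively with argmin (objective: alternative).


-- ===== PORT A =====
def determine_cooking_operation (inputs : List (List (String × String))) (output_name : String) : String :=
  let output_lower := PySem.Str.lower output_name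
  if ["ferment", "aged", "wine", "alcohol"].any (fun keyword => PySem.Str.isIn keyword output_lower) then
    "Processor Setting: Fermentation"
  else if ["extract", "oil", "essence"].any (fun keyword => PySem.Str.isIn keyword output_lower) then
    "Processor Setting: Extract Nutrients"
  else if ["yolk", "egg"].any (fun keyword => PySem.Str.isIn keyword output_lower) then
    "Processor Setting: Chromatic Yolk Formation"
  else if ["bake", "cake", "bread", "pie"].any (fun keyword => PySem.Str.isIn keyword output_lower) then
    "Processor Setting: Baking"
  else if ["grill", "meat", "steak"].any (fun keyword => PySem.Str.isIn keyword output_lower) then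
    "Processor Setting: Grilling"
  else if ["blend", "mix", "combine"].any (fun keyword => PySem.Str.isIn keyword output_lower) then
    "Processor Setting: Blending"
  else if ["soup", "stew", "broth"].any (fun keyword => PySem.Str.isIn keyword output_lower) then
    "Processor Setting: Cooking"
  else if inputs.length == 1 then
    "Processor Setting: Processing"
  else
    "Processor Setting: Combining"

-- ===== PORT B =====
-- B's flat keyword -> priority map (dict in insertion order) and the settings array
def pvKeywordPriority : List (String × Nat) :=
  [ ("ferment", 0), ("aged", 0), ("wine", 0), ("alcohol", 0),
    ("extract", 1), ("oil", 1), ("essence", 1),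
    ("yolk", 2), ("egg", 2),
    ("bake", 3), ("cake", 3), ("bread", 3), ("pie", 3),
    ("grill", 4), ("meat", 4), ("steak", 4),
    ("blend", 5), ("mix", 5), ("combine", 5),
    ("soup", 6), ("stew", 6), ("broth", 6) ]

def pvSettings : List String :=
  ["Fermentation", "Extract Nutrients", "Chromatic Yolk Formation",
   "Baking", "Grilling", "Blending", "Cooking"]

def determine_cooking_operation_alt (inputs : List (List (String × String))) (output_name : String) : String :=
  let low := PySem.Str.lower output_name
  let matched := (pvKeywordPriority.filter (fun kp => PySem.Str.isIn kp.1 low)).map Prod.snd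
  match matched.min? with
  | some p => "Processor Setting: " ++ pvSettings.getD p ""
  | none => if inputs.length == 1 then "Processor Setting: Processing" else "Processor Setting: Combining"

-- ===== PRECONDITION & SPEC =====
def Spec_determine_cooking_operation (inputs : List (List (String × String))) (output_name : String) (out : String) : Prop := out = determine_cooking_operation_alt inputs output_name
instance (inputs : List (List (String × String))) (output_name : String) (out : String) : Decidable (Spec_determine_cooking_operation inputs output_name out) := by unfold Spec_determine_cooking_operation; infer_instance

-- ===== CLAIM (what is proved, stated in full; the proofs are below) =====
def Claim_equal_determine_cooking_operation : Prop := ∀ (inputs : List (List (String × String))) (output_name : String), Dom_determine_cooking_operation inputs output_name → Spec_determine_cooking_operation inputs output_name (determine_cooking_operation inputs output_name)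

-- ===== LEMMAS AND PROOFS =====

-- the keyword groups of A's chain, in order; pvKeywordPriority is their indexed flattening
def pvGroups : List (List String) :=
  [["ferment", "aged", "wine", "alcohol"], ["extract", "oil", "essence"], ["yolk", "egg"],
   ["bake", "cake", "bread", "pie"], ["grill", "meat", "steak"], ["blend", "mix", "combine"],
   ["soup", "stew", "broth"]]

def pvFlatIdx : Nat → List (List String) → List (String × Nat)
  | _, [] => []
  | i, g :: gs => g.map (fun kw => (kw, i)) ++ pvFlatIdx (i + 1) gs

theorem pvTable_eq : pvKeywordPriority = pvFlatIdx 0 pvGroups := by decide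

theorem pvFlatIdx_lb (pred : String → Bool) (i : Nat) (gs : List (List String)) :
    ∀ x ∈ (((pvFlatIdx i gs).filter (fun kp => pred kp.1)).map Prod.snd), i ≤ x := by
  induction gs generalizing i with
  | nil => simp [pvFlatIdx]
  | cons g gs ih =>
    intro x hx
    simp only [pvFlatIdx, List.filter_append, List.map_append, List.mem_append] at hx
    rcases hx with h | h
    · simp only [List.filter_map, List.map_map, List.mem_map] at h
      obtain ⟨kw, _, rfl⟩ := h
      exact le_refl _
    · exact Nat.le_of_succ_le (ih (i + 1) x h)

theorem pvMinFlat (pred : String → Bool) (i : Nat) (gs : List (List String)) :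
    (((pvFlatIdx i gs).filter (fun kp => pred kp.1)).map Prod.snd).min? =
      (gs.findIdx? (fun g => g.any pred)).map (· + i) := by
  induction gs generalizing i with
  | nil => simp [pvFlatIdx]
  | cons g gs ih =>
    simp only [pvFlatIdx, List.filter_append, List.map_append, List.findIdx?_cons]
    by_cases hg : g.any pred = true
    · rw [if_pos hg]
      simp only [Option.map_some, Nat.zero_add]
      rw [List.min?_eq_some_iff]
      constructor
      · obtain ⟨kw, hkw, hpred⟩ := List.any_eq_true.mp hg
        apply List.mem_append_left
        simp only [List.filter_map, List.map_map, List.mem_map]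
        exact ⟨kw, List.mem_filter.mpr ⟨hkw, hpred⟩, rfl⟩
      · intro b hb
        rcases List.mem_append.mp hb with h | h
        · simp only [List.filter_map, List.map_map, List.mem_map] at h
          obtain ⟨kw, _, rfl⟩ := h
          exact le_refl _
        · exact Nat.le_of_succ_le (pvFlatIdx_lb pred (i + 1) gs b h)
    · rw [if_neg hg]
      have hall := List.any_eq_false.mp (Bool.eq_false_iff.mpr hg)
      have hfl : (g.map (fun kw => (kw, i))).filter (fun kp => pred kp.1) = [] := by
        simp only [List.filter_map, List.map_eq_nil_iff, List.filter_eq_nil_iff, Function.comp]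
        exact hall
      rw [hfl]
      simp only [List.map_nil, List.nil_append, ih (i + 1), Option.map_map]
      congr 1
      funext n
      simp only [Function.comp]
      omega

theorem pvMinFlat' (low : String) (i : Nat) (gs : List (List String)) :
    (((pvFlatIdx i gs).filter (fun kp => PySem.Str.isIn kp.1 low)).map Prod.snd).min? =
      (gs.findIdx? (fun g => g.any (fun kw => PySem.Str.isIn kw low))).map (· + i) :=
  pvMinFlat (fun kw => PySem.Str.isIn kw low) i gs

-- ===== VERDICT (by name: the statement is the Claim_ definition above) =====
theorem determine_cooking_operation_spec : Claim_equal_determine_cooking_operation := by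
  intro inputs output_name _
  unfold Spec_determine_cooking_operation
  unfold determine_cooking_operation determine_cooking_operation_alt
  simp only [pvTable_eq, pvMinFlat']
  unfold pvGroups
  simp only [List.findIdx?_cons, List.findIdx?_nil]
  split_ifs <;> simp_all [pvSettings]
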